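-- pv_equiv track=rewrite | github.com/wxxedu/md2anki | Conversions/single_line_md2html.py | highlight2cloze
-- ===== SOURCE A (Python) =====
-- def subString(string,position,changeTo):
-- 	new = []
-- 	for s in string:
-- 		new.append(s)
-- 	new[position] = changeTo
-- 	return "".join(new)
--
-- def highlight2cloze(line):
-- 	# 判断bold是前面还是后面
-- 	isOpen = True
--
-- 	# 把加粗中的**替换成统一的cloze
-- 	for index in range(0, len(line) - 1):
-- 		if line[index] + line[index+1] == "==":
-- 			if isOpen:
-- 				line = subString(line, index + 1, "¡")
-- 				line = subString(line, index, "¶")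
-- 				isOpen = False
-- 			else:
-- 				line = subString(line, index, "™")
-- 				line = subString(line, index + 1, "¶")
-- 				isOpen = True
-- 	line = line.replace("¡", "<label style = \"background-color: yellow;\">{{c*::")
-- 	line = line.replace("™", "}}</label>")
-- 	return line
-- ===== SOURCE B (Python) =====
-- def highlight2cloze(line):
--     # Alternative: one left-to-right pass building the output, instead of A's repeated
--     # in-place whole-string rewrites via subString.
--     out = []
--     is_open = True
--     i = 0
--     n = len(line)
--     while i < n:
--         if line.startswith("==", i):
--             out.append("\u00b6\u00a1" if is_open else "\u2122\u00b6")
--             is_open = not is_open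
--             i += 2
--         else:
--             out.append(line[i])
--             i += 1
--     line = "".join(out)
--     line = line.replace("\u00a1", "<label style = \"background-color: yellow;\">{{c*::")
--     line = line.replace("\u2122", "}}</label>")
--     return line
-- ===== Notes on version B (the rewrite author's own statement) =====
-- stated objective: alternative
-- what changed: A rescans every index pair of a string it repeatedly rebuilds in place (subString copies the whole string on each '==' match); B makes a single left-to-right pass that emits output chunks once (a marker pair on '==', the char otherwise) and joins them at the end, keeping the identical marker/replace finale.
import Mathlib
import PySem

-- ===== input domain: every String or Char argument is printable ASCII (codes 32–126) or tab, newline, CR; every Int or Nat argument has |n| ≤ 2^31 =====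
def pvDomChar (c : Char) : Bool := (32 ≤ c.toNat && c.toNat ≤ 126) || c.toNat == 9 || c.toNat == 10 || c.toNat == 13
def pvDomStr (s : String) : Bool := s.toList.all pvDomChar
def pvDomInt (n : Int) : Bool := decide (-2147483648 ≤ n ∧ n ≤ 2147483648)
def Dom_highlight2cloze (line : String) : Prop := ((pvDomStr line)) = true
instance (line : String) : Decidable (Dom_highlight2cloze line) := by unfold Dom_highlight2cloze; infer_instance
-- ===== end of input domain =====

-- B (alternative): instead of A's index-pair scan over a string it repeatedly rebuilds
-- in place via subString, B makes one left-to-right pass emitting output chunks, then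
-- the same two final replace calls.

-- ===== PORT A =====
-- subString: copy the string char by char into a list, set one position, rejoin.
def subString (string : List Char) (position : Nat) (changeTo : Char) : List Char :=
  let new := string.foldl (fun acc s => acc ++ [s]) []
  new.set position changeTo

-- one iteration of A's for-loop body (state: current line chars, isOpen)
def hlStep (st : List Char × Bool) (index : Nat) : List Char × Bool :=
  let l := st.1
  let isOpen := st.2
  if l.getD index ' ' = '=' ∧ l.getD (index + 1) ' ' = '=' then
    if isOpen then
      (subString (subString l (index + 1) '¡') index '¶', false)
    else
      (subString (subString l index '™') (index + 1) '¶', true)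
  else st

def highlight2cloze (line : String) : String :=
  let cs := line.toList
  let final := (List.range (cs.length - 1)).foldl hlStep (cs, true)
  let line1 := String.mk final.1
  let line2 := PySem.Str.replace line1 "¡" "<label style = \"background-color: yellow;\">{{c*::"
  PySem.Str.replace line2 "™" "}}</label>"

-- ===== PORT B =====
-- Source B's while loop: scan the remaining chars, emitting marker pairs on "==".
def hlScan : List Char → Bool → List Char
  | [], _ => []
  | [c], _ => [c]
  | c1 :: c2 :: rest, isOpen =>
    if c1 = '=' ∧ c2 = '=' then
      (if isOpen then ['¶', '¡'] else ['™', '¶']) ++ hlScan rest (!isOpen)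
    else
      c1 :: hlScan (c2 :: rest) isOpen

def highlight2cloze_alt (line : String) : String :=
  let joined := String.mk (hlScan line.toList true)
  let line1 := PySem.Str.replace joined "¡" "<label style = \"background-color: yellow;\">{{c*::"
  PySem.Str.replace line1 "™" "}}</label>"

-- ===== PRECONDITION & SPEC =====
def Spec_highlight2cloze (line : String) (out : String) : Prop := out = highlight2cloze_alt line
instance (line : String) (out : String) : Decidable (Spec_highlight2cloze line out) := by unfold Spec_highlight2cloze; infer_instance

-- ===== CLAIM (what is proved, stated in full; the proofs are below) =====
def Claim_equal_highlight2cloze : Prop := ∀ (line : String), Dom_highlight2cloze line → Spec_highlight2cloze line (highlight2cloze line)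

-- ===== LEMMAS AND PROOFS =====

theorem foldl_append_id (l : List Char) : l.foldl (fun acc s => acc ++ [s]) [] = l := by
  have h : ∀ (l acc : List Char), l.foldl (fun acc s => acc ++ [s]) acc = acc ++ l := by
    intro l
    induction l with
    | nil => simp
    | cons x xs ih => intro acc; simp [List.foldl, ih]
  simpa using h l []

theorem subString_eq_set (l : List Char) (p : Nat) (c : Char) :
    subString l p c = l.set p c := by
  simp only [subString]
  rw [foldl_append_id]

theorem getD_append_right (pre l : List Char) (j : Nat) (d : Char) :
    (pre ++ l).getD (pre.length + j) d = l.getD j d := by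
  induction pre with
  | nil => simp
  | cons x xs ih => simpa [Nat.succ_add] using ih

theorem set_append_right (pre l : List Char) (j : Nat) (c : Char) :
    (pre ++ l).set (pre.length + j) c = pre ++ l.set j c := by
  induction pre with
  | nil => simp
  | cons x xs ih => simpa [Nat.succ_add] using ih

-- the matched step rewrites the two '=' chars into the marker pair
theorem hlStep_match (pre rest : List Char) (b : Bool) :
    hlStep (pre ++ '=' :: '=' :: rest, b) pre.length
      = (pre ++ (if b then ['¶', '¡'] else ['™', '¶']) ++ rest, !b) := by
  have hg0 : (pre ++ '=' :: '=' :: rest).getD pre.length ' ' = '=' := by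
    simpa using getD_append_right pre ('=' :: '=' :: rest) 0 ' '
  have hg1 : (pre ++ '=' :: '=' :: rest).getD (pre.length + 1) ' ' = '=' := by
    simpa using getD_append_right pre ('=' :: '=' :: rest) 1 ' '
  have hset : ∀ (l : List Char) (c : Char),
      (pre ++ l).set pre.length c = pre ++ l.set 0 c := by
    intro l c
    simpa using set_append_right pre l 0 c
  have hset1 : ∀ (l : List Char) (c : Char),
      (pre ++ l).set (pre.length + 1) c = pre ++ l.set 1 c := by
    intro l c
    simpa using set_append_right pre l 1 c
  cases b <;>
    simp [hlStep, hg0, hg1, subString_eq_set, hset, hset1]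

-- the step right after a match never fires: it reads the marker's 2nd char
theorem hlStep_after (pre tail : List Char) (m1 m2 : Char) (b : Bool) (hm2 : ¬ m2 = '=') :
    hlStep (pre ++ m1 :: m2 :: tail, b) (pre.length + 1) = (pre ++ m1 :: m2 :: tail, b) := by
  have hg : (pre ++ m1 :: m2 :: tail).getD (pre.length + 1) ' ' = m2 := by
    simpa using getD_append_right pre (m1 :: m2 :: tail) 1 ' '
  simp [hlStep, hg, hm2]

theorem key (suf : List Char) : ∀ (pre : List Char) (b : Bool),
    ((List.range' pre.length (suf.length - 1)).foldl hlStep (pre ++ suf, b)).1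
      = pre ++ hlScan suf b := by
  match suf with
  | [] => intro pre b; simp [hlScan]
  | [c] => intro pre b; simp [hlScan]
  | c1 :: c2 :: rest =>
    intro pre b
    have hlen : (c1 :: c2 :: rest).length - 1 = rest.length + 1 := by simp
    rw [hlen, List.range'_succ, List.foldl_cons]
    by_cases hm : c1 = '=' ∧ c2 = '='
    · obtain ⟨h1, h2⟩ := hm
      subst h1; subst h2
      rw [hlStep_match]
      match rest with
      | [] =>
        cases b <;> simp [hlScan]
      | r :: rs =>
        have hlen2 : (r :: rs).length = rs.length + 1 := by simp
        rw [hlen2, List.range'_succ, List.foldl_cons]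
        cases b
        · simp only [Bool.not_false, Bool.not_true, Bool.false_eq_true, if_false, if_true, reduceIte]
          rw [show (pre ++ ['™', '¶'] ++ r :: rs : List Char)
              = pre ++ '™' :: '¶' :: (r :: rs) by simp]
          rw [hlStep_after pre (r :: rs) '™' '¶' true (by decide)]
          have := key (r :: rs) (pre ++ ['™', '¶']) true
          simp only [List.length_append, List.length_cons, List.length_nil] at this ⊢
          rw [show pre.length + 1 + 1 = pre.length + 2 by omega] at this ⊢
          rw [show rs.length + 1 - 1 = rs.length by omega] at this
          rw [show (pre ++ '™' :: '¶' :: (r :: rs) : List Char)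
              = (pre ++ ['™', '¶']) ++ r :: rs by simp] 
          rw [this]
          simp [hlScan]
        · simp only [Bool.not_false, Bool.not_true, Bool.false_eq_true, if_false, if_true, reduceIte]
          rw [show (pre ++ ['¶', '¡'] ++ r :: rs : List Char)
              = pre ++ '¶' :: '¡' :: (r :: rs) by simp]
          rw [hlStep_after pre (r :: rs) '¶' '¡' false (by decide)]
          have := key (r :: rs) (pre ++ ['¶', '¡']) false
          simp only [List.length_append, List.length_cons, List.length_nil] at this ⊢
          rw [show pre.length + 1 + 1 = pre.length + 2 by omega] at this ⊢
          rw [show rs.length + 1 - 1 = rs.length by omega] at this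
          rw [show (pre ++ '¶' :: '¡' :: (r :: rs) : List Char)
              = (pre ++ ['¶', '¡']) ++ r :: rs by simp]
          rw [this]
          simp [hlScan]
    · -- no match: state unchanged, step over c1
      have hg0 : (pre ++ c1 :: c2 :: rest).getD pre.length ' ' = c1 := by
        simpa using getD_append_right pre (c1 :: c2 :: rest) 0 ' '
      have hg1 : (pre ++ c1 :: c2 :: rest).getD (pre.length + 1) ' ' = c2 := by
        simpa using getD_append_right pre (c1 :: c2 :: rest) 1 ' '
      have hstep : hlStep (pre ++ c1 :: c2 :: rest, b) pre.length = (pre ++ c1 :: c2 :: rest, b) := by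
        simp only [hlStep, hg0, hg1]
        rw [if_neg hm]
      rw [hstep]
      have := key (c2 :: rest) (pre ++ [c1]) b
      simp only [List.length_append, List.length_cons, List.length_nil] at this
      rw [show pre.length + (0 + 1) = pre.length + 1 by omega] at this
      rw [show rest.length + 1 - 1 = rest.length by omega] at this
      rw [show (pre ++ c1 :: c2 :: rest : List Char) = (pre ++ [c1]) ++ c2 :: rest by simp]
      rw [this]
      simp [hlScan, hm]

-- ===== VERDICT (by name: the statement is the Claim_ definition above) =====
theorem highlight2cloze_spec : Claim_equal_highlight2cloze := by
  intro line _
  show highlight2cloze line = highlight2cloze_alt line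
  have h := key line.toList [] true
  simp only [List.length_nil, List.nil_append] at h
  simp only [highlight2cloze, highlight2cloze_alt, List.range_eq_range']
  rw [h]
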